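-- pv_equiv track=rewrite | github.com/andrewcooke/cute | src/cute.py | join_indents
-- ===== SOURCE A (Python) =====
-- def is_indent(line):
--     return not line or line[0] == ' '
--
-- def join_indents(old_blocks):
--     new_blocks = []
--     for block in old_blocks:
--         if not new_blocks:
--             new_blocks.append(block)
--         else:
--             if is_indent(block[0]) and is_indent(new_blocks[-1][0]):
--                 new_blocks[-1].extend(block)
--             else:
--                 new_blocks.append(block)
--     return new_blocks
-- ===== SOURCE B (Python) =====
-- def is_indent(line):
--     return not line or line[0] == ' '
--
-- def join_indents(old_blocks):
--     # Scan by index; when an indented block starts a run, consume the whole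
--     # run of following indented blocks into it (same in-place extension of
--     # the run's first block as the original), then append it once.
--     new_blocks = []
--     i, n = 0, len(old_blocks)
--     while i < n:
--         block = old_blocks[i]
--         i += 1
--         if is_indent(block[0]):
--             while i < n and is_indent(old_blocks[i][0]):
--                 block.extend(old_blocks[i])
--                 i += 1
--         new_blocks.append(block)
--     return new_blocks
-- ===== Notes on version B (the rewrite author's own statement) =====
-- stated objective: alternative
-- what changed: Instead of checking the indent status of the output's last block at every step, B scans the input by index and, whenever an indented block begins, consumes the whole maximal run of consecutive indented blocks into it with an inner loop before appending it once.
-- outside the precondition, e.g. on join_indents([[]]): A returns [[]], B raises IndexError; on join_indents([[], ['x']]): A returns [[], ['x']], B raises IndexError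
import Mathlib
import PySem

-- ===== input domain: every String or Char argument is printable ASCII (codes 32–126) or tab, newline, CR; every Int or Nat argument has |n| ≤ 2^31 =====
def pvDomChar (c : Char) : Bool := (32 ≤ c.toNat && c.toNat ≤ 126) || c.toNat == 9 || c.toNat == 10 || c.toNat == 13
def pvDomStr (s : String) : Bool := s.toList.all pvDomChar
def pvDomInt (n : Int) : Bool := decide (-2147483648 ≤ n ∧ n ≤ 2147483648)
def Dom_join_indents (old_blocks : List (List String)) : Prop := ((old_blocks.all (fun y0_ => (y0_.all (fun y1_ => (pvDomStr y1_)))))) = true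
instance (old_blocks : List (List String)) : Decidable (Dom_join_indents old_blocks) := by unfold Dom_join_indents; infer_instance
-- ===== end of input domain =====

-- B merges each maximal run of consecutive indented blocks by an index scan with an
-- inner run-consuming loop, instead of A's check against the last output block.
-- Both A and B extend input lists in place in Python; equivalence here is about the
-- return value (the in-place effects happen to coincide as well, but are not modeled).

-- ===== PORT A =====
-- is_indent(line): not line or line[0] == ' '
def isIndent (line : String) : Bool :=
  match line.toList with
  | [] => true
  | c :: _ => c == ' '

-- indent status of a block's first line (block[0]; blocks are nonempty under Pre_)
def blockIndent (b : List String) : Bool := isIndent (b.headD "")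

def join_indents (old_blocks : List (List String)) : List (List String) :=
  old_blocks.foldl
    (fun new_blocks block =>
      if new_blocks.isEmpty then
        new_blocks ++ [block]
      else
        if blockIndent block && blockIndent (new_blocks.getLastD []) then
          new_blocks.dropLast ++ [new_blocks.getLastD [] ++ block]
        else
          new_blocks ++ [block])
    [] 

-- ===== PORT B =====
-- inner+outer while loop of Source B: each step takes one block; if it is indented it
-- absorbs the following maximal run of indented blocks (takeWhile/dropWhile = the
-- inner while), then emits it.
def join_indents_alt (old_blocks : List (List String)) : List (List String) :=
  match old_blocks with
  | [] => []
  | block :: rest =>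
    if blockIndent block then
      (block ++ (rest.takeWhile blockIndent).flatten) :: join_indents_alt (rest.dropWhile blockIndent)
    else
      block :: join_indents_alt rest
termination_by old_blocks.length
decreasing_by
  · have := List.length_dropWhile_le (p := blockIndent) (l := rest)
    simp; omega
  · simp

-- ===== PRECONDITION & SPEC =====
-- Pre_ excludes inputs containing an empty block: there A either raises IndexError
-- (block[0]) or, when the empty block is first and never tested, returns it untouched,
-- while B's own indexing block[0] raises; B raises on every excluded input it differs on.
def Pre_join_indents (old_blocks : List (List String)) : Prop :=
  ∀ b ∈ old_blocks, b ≠ []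
instance (old_blocks : List (List String)) : Decidable (Pre_join_indents old_blocks) := by
  unfold Pre_join_indents; infer_instance

def pvWitness_join_indents : List (List String) :=
  [["a"], [" b", "c"], [" d"], ["e"], ["", "f"]]

def Spec_join_indents (old_blocks : List (List String)) (out : List (List String)) : Prop := out = join_indents_alt old_blocks
instance (old_blocks : List (List String)) (out : List (List String)) : Decidable (Spec_join_indents old_blocks out) := by unfold Spec_join_indents; infer_instance

-- ===== CLAIM (what is proved, stated in full; the proofs are below) =====
def Claim_equal_join_indents : Prop := ∀ (old_blocks : List (List String)), Dom_join_indents old_blocks → Pre_join_indents old_blocks → Spec_join_indents old_blocks (join_indents old_blocks)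

-- ===== LEMMAS AND PROOFS =====

-- A's fold, abstracted: 'consume last l' is what A appends after the output already
-- ends in block 'last'.
def consume (last : List String) : List (List String) → List (List String)
  | [] => [last]
  | b :: l =>
    if blockIndent b && blockIndent last then consume (last ++ b) l
    else last :: consume b l

lemma blockIndent_append (last b : List String) (h : last ≠ []) :
    blockIndent (last ++ b) = blockIndent last := by
  cases last with
  | nil => exact absurd rfl h
  | cons x xs => simp [blockIndent]

lemma foldA (l : List (List String)) :
    ∀ (init : List (List String)) (last : List String),
    l.foldl
      (fun new_blocks block =>
        if new_blocks.isEmpty then new_blocks ++ [block]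
        else
          if blockIndent block && blockIndent (new_blocks.getLastD []) then
            new_blocks.dropLast ++ [new_blocks.getLastD [] ++ block]
          else new_blocks ++ [block])
      (init ++ [last]) = init ++ consume last l := by
  induction l with
  | nil => intro init last; simp [consume]
  | cons b l ih =>
    intro init last
    have hne : (init ++ [last]).isEmpty = false := by simp
    have hlast : (init ++ [last]).getLastD [] = last := by simp
    have hdrop : (init ++ [last]).dropLast = init := by simp
    simp only [List.foldl_cons, hne, hlast, hdrop, Bool.false_eq_true, if_false]
    by_cases h : (blockIndent b && blockIndent last) = true
    · rw [if_pos h, ih]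
      simp only [consume, if_pos h]
    · rw [if_neg h, ih (init ++ [last]) b]
      simp only [consume, if_neg h]
      simp

lemma consume_eq (l : List (List String)) :
    ∀ (last : List String), (∀ b ∈ l, b ≠ []) → last ≠ [] →
    consume last l =
      if blockIndent last then
        (last ++ (l.takeWhile blockIndent).flatten) :: join_indents_alt (l.dropWhile blockIndent)
      else last :: join_indents_alt l := by
  induction l with
  | nil =>
    intro last _ _
    by_cases h : blockIndent last = true <;>
      simp [consume, join_indents_alt, h]
  | cons b l ih =>
    intro last hne hlast
    have hb : b ≠ [] := hne b (by simp)
    have hl : ∀ x ∈ l, x ≠ [] := fun x hx => hne x (by simp [hx])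
    by_cases hpl : blockIndent last = true
    · by_cases hpb : blockIndent b = true
      · have hmerge : blockIndent (last ++ b) = true := by
          rw [blockIndent_append last b hlast]; exact hpl
        simp only [consume, hpb, hpl, Bool.and_self, if_true]
        rw [ih (last ++ b) hl (by simp [hlast])]
        simp [hmerge, hpb]
      · simp only [consume, hpb, Bool.false_and, Bool.false_eq_true, if_false, hpl, if_true]
        rw [ih b hl hb]
        simp [hpb, join_indents_alt]
    · simp only [consume, hpl, Bool.and_false, Bool.false_eq_true, if_false]
      rw [ih b hl hb]
      by_cases hpb : blockIndent b = true <;>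
        simp [join_indents_alt, hpb]

theorem join_indents_eq (old_blocks : List (List String))
    (hpre : ∀ b ∈ old_blocks, b ≠ []) :
    join_indents old_blocks = join_indents_alt old_blocks := by
  cases old_blocks with
  | nil => simp [join_indents, join_indents_alt]
  | cons b l =>
    have hb : b ≠ [] := hpre b (by simp)
    have hl : ∀ x ∈ l, x ≠ [] := fun x hx => hpre x (by simp [hx])
    unfold join_indents
    simp only [List.foldl_cons, List.isEmpty_nil, if_true, List.nil_append]
    rw [show ([b] : List (List String)) = [] ++ [b] from rfl, foldA l [] b, List.nil_append,
      consume_eq l b hl hb]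
    by_cases hpb : blockIndent b = true <;> simp [join_indents_alt, hpb]

-- ===== VERDICT (by name: the statement is the Claim_ definition above) =====
theorem join_indents_spec : Claim_equal_join_indents := by
  intro old_blocks _ hpre
  unfold Spec_join_indents
  exact join_indents_eq old_blocks hpre
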